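-- pv_equiv track=rewrite | github.com/serweryn617/AoC | year15/puzzle3/puzzle.py | unique_houses
-- ===== SOURCE A (Python) =====
-- DIRECTIONS = {
--     '<': (-1, 0),
--     '>': (1, 0),
--     '^': (0, 1),
--     'v': (0, -1),
-- }
--
-- def unique_houses(data):
--     pos = [0, 0]
--     unique = set([tuple(pos)])
--     for d in data:
--         delta = DIRECTIONS[d]
--         pos[0] += delta[0]
--         pos[1] += delta[1]
--         unique.add(tuple(pos))
--     return unique
-- ===== SOURCE B (Python) =====
-- DIRECTIONS = {
--     '<': (-1, 0),
--     '>': (1, 0),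
--     '^': (0, 1),
--     'v': (0, -1),
-- }
--
-- def _walk(s):
--     # (set of positions visited starting from the origin, total displacement of s)
--     if len(s) == 0:
--         return {(0, 0)}, (0, 0)
--     if len(s) == 1:
--         d = DIRECTIONS[s[0]]
--         return {(0, 0), d}, d
--     mid = len(s) // 2
--     left, d1 = _walk(s[:mid])
--     right, d2 = _walk(s[mid:])
--     merged = left | {(x + d1[0], y + d1[1]) for (x, y) in right}
--     return merged, (d1[0] + d2[0], d1[1] + d2[1])
--
-- def unique_houses(data):
--     visited, _ = _walk(data)
--     return visited
-- ===== Notes on version B (the rewrite author's own statement) =====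
-- stated objective: alternative
-- what changed: B computes the visited set by divide and conquer: it splits the move string in half, recursively computes each half's visited set together with its total displacement, and merges by translating the right half's set by the left half's displacement, instead of A's single left-to-right scan with a running position.
import Mathlib
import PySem

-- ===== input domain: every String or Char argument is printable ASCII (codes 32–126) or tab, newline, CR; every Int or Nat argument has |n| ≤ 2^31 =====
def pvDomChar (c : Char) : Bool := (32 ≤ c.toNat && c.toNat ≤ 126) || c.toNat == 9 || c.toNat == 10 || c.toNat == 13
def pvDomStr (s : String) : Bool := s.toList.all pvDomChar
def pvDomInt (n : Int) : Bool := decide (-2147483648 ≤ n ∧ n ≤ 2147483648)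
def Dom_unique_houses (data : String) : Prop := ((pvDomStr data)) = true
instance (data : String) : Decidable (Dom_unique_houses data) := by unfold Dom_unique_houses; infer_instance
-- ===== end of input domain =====

-- B replaces A's single left-to-right scan by divide and conquer: split the moves in half,
-- recurse on each half (visited set + total displacement), merge by translating the right
-- half's set by the left half's displacement.

-- the DIRECTIONS table (shared module constant); total form, exact on Pre_ (chars in "<>^v")
def pvDir (c : Char) : Int × Int :=
  if c = '<' then (-1, 0)
  else if c = '>' then (1, 0)
  else if c = '^' then (0, 1)
  else (0, -1)

-- ===== PORT A =====
def unique_houses (data : String) : List (Int × Int) :=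
  (data.toList.foldl
    (fun (st : (Int × Int) × PySem.Set (Int × Int)) d =>
      let delta := pvDir d
      let pos := (st.1.1 + delta.1, st.1.2 + delta.2)
      (pos, PySem.Set.add st.2 pos))
    (((0 : Int), (0 : Int)), PySem.Set.ofList [((0 : Int), (0 : Int))])).2

-- ===== PORT B =====
-- _walk; s[:mid]/s[mid:] with 0 ≤ mid ≤ len are exactly take/drop
def pvWalk : List Char → PySem.Set (Int × Int) × (Int × Int)
  | [] => (PySem.Set.ofList [((0 : Int), (0 : Int))], (0, 0))
  | [c] => (PySem.Set.ofList [((0 : Int), (0 : Int)), pvDir c], pvDir c)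
  | c1 :: c2 :: rest =>
      let s := c1 :: c2 :: rest
      let mid := s.length / 2
      let L := pvWalk (s.take mid)
      let R := pvWalk (s.drop mid)
      (PySem.Set.union L.1 (R.1.map (fun q => (q.1 + L.2.1, q.2 + L.2.2))),
       (L.2.1 + R.2.1, L.2.2 + R.2.2))
termination_by s => s.length
decreasing_by
  · simp; omega
  · simp; omega

def unique_houses_alt (data : String) : List (Int × Int) :=
  (pvWalk data.toList).1

-- ===== PRECONDITION & SPEC =====
-- Pre_ excludes exactly the strings containing a character outside "<>^v", on which
-- A's (and B's) DIRECTIONS lookup raises KeyError.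
def Pre_unique_houses (data : String) : Prop :=
  data.toList.all (fun c => c = '<' || c = '>' || c = '^' || c = 'v') = true
instance (data : String) : Decidable (Pre_unique_houses data) := by
  unfold Pre_unique_houses; infer_instance
def pvWitness_unique_houses : String := "^>v<<"

def Spec_unique_houses (data : String) (out : List (Int × Int)) : Prop := out = unique_houses_alt data
instance (data : String) (out : List (Int × Int)) : Decidable (Spec_unique_houses data out) := by unfold Spec_unique_houses; infer_instance

-- ===== CLAIM (what is proved, stated in full; the proofs are below) =====
def Claim_equal_unique_houses : Prop := ∀ (data : String), Dom_unique_houses data → Pre_unique_houses data → Spec_unique_houses data (unique_houses data)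

-- ===== LEMMAS AND PROOFS =====

-- positions visited after each move of l, starting from p (excluding p)
def pvPath (p : Int × Int) : List Char → List (Int × Int)
  | [] => []
  | c :: l =>
      let q := (p.1 + (pvDir c).1, p.2 + (pvDir c).2)
      q :: pvPath q l

-- total displacement of a move list
def pvDisp : List Char → Int × Int
  | [] => (0, 0)
  | c :: l => ((pvDir c).1 + (pvDisp l).1, (pvDir c).2 + (pvDisp l).2)

theorem pvPath_shift (t : Int × Int) (l : List Char) (p : Int × Int) :
    pvPath (p.1 + t.1, p.2 + t.2) l = (pvPath p l).map (fun q => (q.1 + t.1, q.2 + t.2)) := by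
  induction l generalizing p with
  | nil => rfl
  | cons c l ih =>
      simp only [pvPath, List.map]
      have h := ih (p.1 + (pvDir c).1, p.2 + (pvDir c).2)
      simp only at h
      rw [show p.1 + t.1 + (pvDir c).1 = p.1 + (pvDir c).1 + t.1 by ring,
          show p.2 + t.2 + (pvDir c).2 = p.2 + (pvDir c).2 + t.2 by ring, h]

theorem pvPath_append (l1 l2 : List Char) (p : Int × Int) :
    pvPath p (l1 ++ l2)
      = pvPath p l1 ++ pvPath (p.1 + (pvDisp l1).1, p.2 + (pvDisp l1).2) l2 := by
  induction l1 generalizing p with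
  | nil => simp [pvPath, pvDisp]
  | cons c l ih =>
      simp only [List.cons_append, pvPath, pvDisp]
      rw [ih]
      ring_nf

theorem pvDisp_mem (l : List Char) (p : Int × Int) :
    (p.1 + (pvDisp l).1, p.2 + (pvDisp l).2) ∈ p :: pvPath p l := by
  induction l generalizing p with
  | nil => simp [pvDisp]
  | cons c l ih =>
      have h := ih (p.1 + (pvDir c).1, p.2 + (pvDir c).2)
      simp only at h
      simp only [pvPath, pvDisp]
      rw [show p.1 + ((pvDir c).1 + (pvDisp l).1) = p.1 + (pvDir c).1 + (pvDisp l).1 by ring,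
          show p.2 + ((pvDir c).2 + (pvDisp l).2) = p.2 + (pvDir c).2 + (pvDisp l).2 by ring]
      exact List.mem_cons_of_mem _ h

-- update by a deduplicated, injectively mapped list = update by the mapped list itself
theorem pvUpdate_map_ofList {α β : Type} [BEq α] [LawfulBEq α] [BEq β] [LawfulBEq β]
    (f : α → β) (Y : List α) (s : PySem.Set β) :
    PySem.Set.update s ((PySem.Set.ofList Y).map f) = PySem.Set.update s (Y.map f) := by
  induction Y using List.reverseRecOn generalizing s with
  | nil => rfl
  | append_singleton Y y ih =>
      by_cases hy : y ∈ Y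
      · rw [PySem.Set.ofList_append_singleton, PySem.Set.add_of_mem (by simpa [PySem.Set.mem_ofList] using hy)]
        rw [ih, List.map_append, PySem.Set.update_append]
        have : f y ∈ PySem.Set.update s (Y.map f) := by
          rw [PySem.Set.mem_update]; right; exact List.mem_map_of_mem hy
        simp [PySem.Set.update_cons, PySem.Set.add_of_mem this, PySem.Set.update_nil]
      · rw [PySem.Set.ofList_append_singleton, PySem.Set.add_of_not_mem (by simpa [PySem.Set.mem_ofList] using hy)]
        rw [List.map_append, List.map_append, PySem.Set.update_append, PySem.Set.update_append, ih]

theorem pvDisp_append (l1 l2 : List Char) :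
    pvDisp (l1 ++ l2) = ((pvDisp l1).1 + (pvDisp l2).1, (pvDisp l1).2 + (pvDisp l2).2) := by
  induction l1 with
  | nil => simp [pvDisp]
  | cons c l ih => simp [pvDisp, ih]; ring_nf; simp

theorem pvWalk_eq (s : List Char) :
    pvWalk s = (PySem.Set.ofList (((0 : Int), (0 : Int)) :: pvPath (0, 0) s), pvDisp s) := by
  induction s using pvWalk.induct with
  | case1 => simp [pvWalk, pvPath, pvDisp]
  | case2 c => simp [pvWalk, pvPath, pvDisp, PySem.Set.ofList]
  | case3 c1 c2 rest s mid ih1 ih2 =>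
      have hsplit := List.take_append_drop ((c1 :: c2 :: rest).length / 2) (c1 :: c2 :: rest)
      set t := (c1 :: c2 :: rest).take ((c1 :: c2 :: rest).length / 2) with ht
      set d := (c1 :: c2 :: rest).drop ((c1 :: c2 :: rest).length / 2) with hd
      rw [show pvWalk (c1 :: c2 :: rest)
            = (PySem.Set.union (pvWalk t).1
                ((pvWalk d).1.map (fun q => (q.1 + (pvWalk t).2.1, q.2 + (pvWalk t).2.2))),
               ((pvWalk t).2.1 + (pvWalk d).2.1, (pvWalk t).2.2 + (pvWalk d).2.2)) from by
            rw [pvWalk]]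
      rw [ih1, ih2]
      rw [← hsplit, pvDisp_append]
      refine Prod.ext ?_ rfl
      simp only
      rw [PySem.Set.union, pvUpdate_map_ofList]
      rw [pvPath_append]
      rw [show pvPath ((0 : Int) + (pvDisp t).1, (0 : Int) + (pvDisp t).2) d
            = pvPath ((0 : Int) + (pvDisp t).1, (0 : Int) + (pvDisp t).2) d from rfl]
      rw [show ((0 : Int) + (pvDisp t).1, (0 : Int) + (pvDisp t).2)
            = (((0 : Int), (0 : Int)).1 + (pvDisp t).1, ((0 : Int), (0 : Int)).2 + (pvDisp t).2) from rfl,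
          pvPath_shift]
      rw [← List.cons_append, PySem.Set.ofList_append, List.map_cons, PySem.Set.update_cons]
      simp only [zero_add]
      have hmem : (((pvDisp t).1, (pvDisp t).2) : Int × Int)
          ∈ PySem.Set.ofList (((0 : Int), (0 : Int)) :: pvPath (0, 0) t) := by
        rw [PySem.Set.mem_ofList]
        simpa using pvDisp_mem t ((0 : Int), (0 : Int))
      rw [PySem.Set.add_of_mem hmem]

theorem pvFoldA (l : List Char) (p : Int × Int) (s : PySem.Set (Int × Int)) :
    (l.foldl
      (fun (st : (Int × Int) × PySem.Set (Int × Int)) d =>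
        let delta := pvDir d
        let pos := (st.1.1 + delta.1, st.1.2 + delta.2)
        (pos, PySem.Set.add st.2 pos))
      (p, s)).2 = (pvPath p l).foldl PySem.Set.add s := by
  induction l generalizing p s with
  | nil => rfl
  | cons c l ih => simp [pvPath, List.foldl, ih]

theorem unique_houses_eq (data : String) :
    unique_houses data = unique_houses_alt data := by
  simp only [unique_houses, unique_houses_alt]
  rw [pvFoldA data.toList ((0 : Int), (0 : Int)) (PySem.Set.ofList [((0 : Int), (0 : Int))])]
  rw [pvWalk_eq]
  rw [show (((0 : Int), (0 : Int)) :: pvPath (0, 0) data.toList)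
        = [((0 : Int), (0 : Int))] ++ pvPath ((0 : Int), (0 : Int)) data.toList from rfl,
      PySem.Set.ofList_append]
  rfl

-- ===== VERDICT (by name: the statement is the Claim_ definition above) =====
theorem unique_houses_spec : Claim_equal_unique_houses := by
  intro data _ _
  unfold Spec_unique_houses
  exact unique_houses_eq data
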